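-- pv_equiv track=rewrite | github.com/Miranaaaaaaaaaaaaa/RPI-csci1100-Python | hw03/hw3Part2.py | can_or_cannot
-- ===== SOURCE A (Python) =====
-- def can_or_cannot(current, coins, i, final_list):
--     if i < 0 or current == 0:
--         return final_list
--     if current >= coins[i]:
--         current = current - coins[i]
--         final_list.append(coins[i])
--         return can_or_cannot(current, coins, i-1, final_list)
--     else:
--         return can_or_cannot(current, coins, i-1, final_list)
-- ===== SOURCE B (Python) =====
-- def can_or_cannot(current, coins, i, final_list):
--     prefix = coins[:i + 1] if i >= 0 else []
--     for c in reversed(prefix):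
--         if current == 0:
--             break
--         if current >= c:
--             current -= c
--             final_list.append(c)
--     return final_list
-- ===== Notes on version B (the rewrite author's own statement) =====
-- stated objective: idiomatic
-- what changed: Replaced the tail recursion over a decreasing index by a single for-loop over the reversed prefix coins[:i+1] with an early break when current hits 0.
-- outside the precondition, e.g. on can_or_cannot(3, [1], 5, []): A raises IndexError, B returns [1]
import Mathlib
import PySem

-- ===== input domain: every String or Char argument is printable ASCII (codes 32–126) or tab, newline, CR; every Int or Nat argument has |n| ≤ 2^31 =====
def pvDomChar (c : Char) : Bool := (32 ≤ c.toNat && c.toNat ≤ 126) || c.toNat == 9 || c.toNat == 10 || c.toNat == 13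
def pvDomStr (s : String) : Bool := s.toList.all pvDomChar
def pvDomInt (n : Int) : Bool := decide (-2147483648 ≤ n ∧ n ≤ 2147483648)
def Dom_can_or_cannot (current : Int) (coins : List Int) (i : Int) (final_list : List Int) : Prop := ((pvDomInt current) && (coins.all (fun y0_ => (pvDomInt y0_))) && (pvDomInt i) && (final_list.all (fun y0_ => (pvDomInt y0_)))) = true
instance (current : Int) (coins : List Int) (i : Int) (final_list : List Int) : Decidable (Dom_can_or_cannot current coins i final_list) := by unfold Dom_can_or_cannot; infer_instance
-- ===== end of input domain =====

-- B replaces A's tail recursion on a decreasing index by a for-loop over the reversed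
-- prefix coins[:i+1] with an early break (objective: idiomatic).  Equivalence is about
-- the RETURN value; both A and B append to the passed-in final_list in place.

-- ===== PORT A =====
def can_or_cannot (current : Int) (coins : List Int) (i : Int) (final_list : List Int) : List Int :=
  if i < 0 ∨ current = 0 then final_list
  else
    match PySem.List.pyGet? coins i with
    | none => final_list  -- Python raises IndexError here; such inputs are outside Pre_
    | some c =>
      if current ≥ c then can_or_cannot (current - c) coins (i - 1) (final_list ++ [c])
      else can_or_cannot current coins (i - 1) final_list
termination_by (i + 1).toNat
decreasing_by all_goals omega

-- ===== PORT B =====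
-- B's for-loop with break, as structural recursion over the list it iterates
def pvLoopB (current : Int) (cs : List Int) (final_list : List Int) : List Int :=
  match cs with
  | [] => final_list
  | c :: rest =>
    if current = 0 then final_list
    else if current ≥ c then pvLoopB (current - c) rest (final_list ++ [c])
    else pvLoopB current rest final_list

def can_or_cannot_alt (current : Int) (coins : List Int) (i : Int) (final_list : List Int) : List Int :=
  let pfx := if i ≥ 0 then PySem.List.slice coins none (some (i + 1)) else []
  pvLoopB current pfx.reverse final_list

-- ===== PRECONDITION & SPEC =====
-- Pre_ excludes exactly the inputs on which Python A raises IndexError (coins[i] with i past the end).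
def Pre_can_or_cannot (current : Int) (coins : List Int) (i : Int) (final_list : List Int) : Prop :=
  current = 0 ∨ i < (coins.length : Int)
instance (current : Int) (coins : List Int) (i : Int) (final_list : List Int) : Decidable (Pre_can_or_cannot current coins i final_list) := by unfold Pre_can_or_cannot; infer_instance

def pvWitness_can_or_cannot : Int × List Int × Int × List Int := (6, [1, 2, 5], 2, [])

def Spec_can_or_cannot (current : Int) (coins : List Int) (i : Int) (final_list : List Int) (out : List Int) : Prop := out = can_or_cannot_alt current coins i final_list
instance (current : Int) (coins : List Int) (i : Int) (final_list : List Int) (out : List Int) : Decidable (Spec_can_or_cannot current coins i final_list out) := by unfold Spec_can_or_cannot; infer_instance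

-- ===== CLAIM (what is proved, stated in full; the proofs are below) =====
def Claim_equal_can_or_cannot : Prop := ∀ (current : Int) (coins : List Int) (i : Int) (final_list : List Int), Dom_can_or_cannot current coins i final_list → Pre_can_or_cannot current coins i final_list → Spec_can_or_cannot current coins i final_list (can_or_cannot current coins i final_list)

-- ===== LEMMAS AND PROOFS =====
lemma pvLoopB_zero (cs final_list : List Int) : pvLoopB 0 cs final_list = final_list := by
  cases cs <;> simp [pvLoopB]

lemma pv_key (coins : List Int) : ∀ (n : Nat) (i current : Int) (acc : List Int),
    (i + 1).toNat = n → i < (coins.length : Int) →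
    can_or_cannot current coins i acc = pvLoopB current ((coins.take (i + 1).toNat).reverse) acc := by
  intro n
  induction n with
  | zero =>
    intro i current acc hn _
    have hi : i < 0 := by omega
    rw [can_or_cannot, hn]
    simp [hi, pvLoopB]
  | succ n ih =>
    intro i current acc hn hlen
    have hi : 0 ≤ i := by omega
    have hlt : i.toNat < coins.length := by omega
    have hitn : (i + 1).toNat = i.toNat + 1 := by omega
    have htake : coins.take ((i + 1).toNat) = coins.take i.toNat ++ [coins[i.toNat]] := by
      rw [hitn, List.take_add_one, List.getElem?_eq_getElem hlt]
      simp
    by_cases hc : current = 0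
    · rw [can_or_cannot, htake]
      simp [hc, pvLoopB_zero]
    · have hget : PySem.List.pyGet? coins i = some coins[i.toNat] := by
        have h1 : PySem.List.pyGet? coins i = coins[i.toNat]? := by
          conv_lhs => rw [show i = ((i.toNat : Nat) : Int) from by omega]
          rw [PySem.List.pyGet?_natCast]
        rw [h1, List.getElem?_eq_getElem hlt]
      have hn' : (i - 1 + 1).toNat = i.toNat := by omega
      have hlen' : i - 1 < (coins.length : Int) := by omega
      have hcond : ¬ (i < 0 ∨ current = 0) := by omega
      rw [can_or_cannot, htake, hget, if_neg hcond]
      simp only [List.reverse_append, List.reverse_cons, List.reverse_nil,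
        List.nil_append, List.cons_append, pvLoopB]
      rw [if_neg hc]
      have hret := ih (i - 1) (current - coins[i.toNat]) (acc ++ [coins[i.toNat]]) (by omega) hlen'
      have hret' := ih (i - 1) current acc (by omega) hlen'
      rw [hn'] at hret hret'
      split
      · exact hret
      · exact hret'

lemma pv_alt_eq (current : Int) (coins : List Int) (i : Int) (acc : List Int) :
    can_or_cannot_alt current coins i acc = pvLoopB current ((coins.take (i + 1).toNat).reverse) acc := by
  unfold can_or_cannot_alt
  by_cases hi : i ≥ 0
  · simp only [hi, if_true]
    rw [PySem.List.slice_to _ (by omega)]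
  · have h0 : (i + 1).toNat = 0 := by omega
    simp [hi, h0]

-- ===== VERDICT (by name: the statement is the Claim_ definition above) =====
theorem can_or_cannot_spec : Claim_equal_can_or_cannot := by
  intro current coins i final_list _ hpre
  unfold Spec_can_or_cannot
  rw [pv_alt_eq]
  rcases hpre with h0 | hlen
  · subst h0
    rw [can_or_cannot, pvLoopB_zero]
    simp
  · exact pv_key coins _ i current final_list rfl hlen
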